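-- pv_equiv track=rewrite | github.com/Taoge123/OptimizedLeetcode | LeetcodeNew/DFS/LC_851_Loud_and_Rich.py | loudAndRich
-- ===== SOURCE A (Python) =====
-- def loudAndRich(richer, quiet):
--     N = len(quiet)
--     graph = [[] for _ in range(N)]
--     for u, v in richer:
--         graph[v].append(u)
--
--     answer = [None] * N
--     def dfs(node):
--         #Want least quiet person in this subtree
--         if answer[node] is None:
--             answer[node] = node
--             for child in graph[node]:
--                 cand = dfs(child)
--                 if quiet[cand] < quiet[answer[node]]:
--                     answer[node] = cand
--         return answer[node]
--
--     return map(dfs, range(N))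
-- ===== SOURCE B (Python) =====
-- def loudAndRich(richer, quiet):
--     n = len(quiet)
--     graph = [[] for _ in range(n)]
--     for u, v in richer:
--         graph[v].append(u)
--
--     def relax(prev):
--         nxt = []
--         for v in range(n):
--             best = v
--             for u in graph[v]:
--                 if quiet[prev[u]] < quiet[best]:
--                     best = prev[u]
--             nxt.append(best)
--         return nxt
--
--     ans = list(range(n))
--     for _ in range(n):
--         nxt = relax(ans)
--         if nxt == ans:
--             break
--         ans = nxt
--     return map(lambda i: ans[i], range(n))
-- ===== Notes on version B (the rewrite author's own statement) =====
-- stated objective: alternative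
-- what changed: Replaces the memoized recursive DFS (mutable answer array threaded through recursion) by a pure round-based fixpoint iteration: repeatedly relax every node's answer from the previous round's array (Jacobi-style) until it stabilises. Pre_ excludes malformed rows and out-of-range indices (A raises ValueError/IndexError), negative in-range indices (A returns labels that depend on Python's negative-index wraparound and visitation order), and cyclic richer relations (A returns values reflecting the in-progress state of its memo array; the problem's premise guarantees acyclicity).
-- outside the precondition, e.g. on loudAndRich([[2, 3], [3, 3], [3, 2], [0, 2]], [3, 1, 4, 4]): A returns [0, 1, 0, 3], B returns [0, 1, 0, 0]; on loudAndRich([[-1, 0]], [0, 1]): A returns [0, -1], B returns [0, 1]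
import Mathlib
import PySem

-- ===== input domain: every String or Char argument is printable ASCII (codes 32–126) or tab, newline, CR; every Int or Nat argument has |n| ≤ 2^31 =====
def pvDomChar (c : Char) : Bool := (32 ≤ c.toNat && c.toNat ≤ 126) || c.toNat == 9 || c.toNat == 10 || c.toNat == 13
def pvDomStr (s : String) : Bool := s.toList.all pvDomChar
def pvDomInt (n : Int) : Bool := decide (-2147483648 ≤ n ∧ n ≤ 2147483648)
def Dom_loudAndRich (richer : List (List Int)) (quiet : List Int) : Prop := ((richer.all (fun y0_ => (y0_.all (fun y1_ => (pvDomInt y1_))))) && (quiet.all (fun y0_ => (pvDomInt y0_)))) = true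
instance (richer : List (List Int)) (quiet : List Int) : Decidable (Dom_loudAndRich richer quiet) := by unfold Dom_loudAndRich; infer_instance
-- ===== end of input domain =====

-- B replaces A's memoized recursive DFS by a round-based fixpoint iteration (relax every
-- node from the previous round's array until it stabilises) — objective: alternative
-- algorithm, not faster.  Return-value equivalence only (neither version mutates its
-- arguments observably).

-- ===== PORT A =====
-- graph = [[] for _ in range(N)]; for u, v in richer: graph[v].append(u)
-- (shared by both ports: A's and B's Python build the graph with these same lines).
-- Rows that are not 2-element lists make Python raise ValueError (unpacking) and
-- out-of-range indices raise IndexError; the `match`/default guards below return the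
-- accumulator unchanged there — those inputs are excluded by Pre_loudAndRich.
def pvBuildGraph (richer : List (List Int)) (n : Nat) : List (List Int) :=
  richer.foldl (fun g row =>
    match row with
    | [u, v] => PySem.List.pySetD g v ((PySem.List.pyGetD g v []) ++ [u])
    | _ => g) (List.replicate n [])

-- def dfs(node): memoized recursion on the mutable `answer` array (entries None = unset).
-- `fuel` is a totality guard only (Python has no fuel); with fuel = N+1 it is never
-- exhausted on inputs satisfying Pre_loudAndRich.
def dfsA (graph : List (List Int)) (quiet : List Int) :
    Nat → Int → List (Option Int) → Int × List (Option Int)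
  | 0, node, ans => (node, ans)   -- fuel guard, unreachable under Pre_loudAndRich
  | k+1, node, ans =>
    match PySem.List.pyGetD ans node none with
    | some r => (r, ans)          -- answer[node] is not None: return it
    | none =>
      let ans1 := PySem.List.pySetD ans node (some node)   -- answer[node] = node
      let ans2 := (PySem.List.pyGetD graph node []).foldl (fun a child =>
        let res := dfsA graph quiet k child a              -- cand = dfs(child)
        if PySem.List.pyGetD quiet res.1 0 <
           PySem.List.pyGetD quiet ((PySem.List.pyGetD res.2 node none).getD node) 0
        then PySem.List.pySetD res.2 node (some res.1)     -- answer[node] = cand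
        else res.2) ans1
      ((PySem.List.pyGetD ans2 node none).getD node, ans2)

-- return map(dfs, range(N)) : evaluated left to right, threading the answer array
def loudAndRich (richer : List (List Int)) (quiet : List Int) : List Int :=
  let n := quiet.length
  let graph := pvBuildGraph richer n
  ((PySem.List.pyRange 0 (n : Int) 1).foldl
    (fun (acc : List Int × List (Option Int)) i =>
      let res := dfsA graph quiet (n+1) i acc.2
      (acc.1 ++ [res.1], res.2)) ([], List.replicate n none)).1

-- ===== PORT B =====
-- inner loop of relax: best = v; for u in graph[v]: if quiet[prev[u]] < quiet[best]: best = prev[u]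
def bBest (quiet : List Int) (prev : List Int) (v : Int) (gs : List Int) : Int :=
  gs.foldl (fun best u =>
    let p := PySem.List.pyGetD prev u 0
    if PySem.List.pyGetD quiet p 0 < PySem.List.pyGetD quiet best 0 then p else best) v

-- def relax(prev): nxt = []; for v in range(n): ... ; nxt.append(best); return nxt
def bRelax (graph : List (List Int)) (quiet : List Int) (n : Nat) (prev : List Int) : List Int :=
  (PySem.List.pyRange 0 (n : Int) 1).foldl
    (fun nxt v => nxt ++ [bBest quiet prev v (PySem.List.pyGetD graph v [])]) []

-- for _ in range(n): nxt = relax(ans); if nxt == ans: break; ans = nxt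
def bIter (graph : List (List Int)) (quiet : List Int) (n : Nat) :
    Nat → List Int → List Int
  | 0, ans => ans
  | k+1, ans =>
    let nxt := bRelax graph quiet n ans
    if nxt == ans then ans else bIter graph quiet n k nxt

def loudAndRich_alt (richer : List (List Int)) (quiet : List Int) : List Int :=
  let n := quiet.length
  let graph := pvBuildGraph richer n
  let ans := bIter graph quiet n n (PySem.List.pyRange 0 (n : Int) 1)  -- ans = list(range(n))
  (PySem.List.pyRange 0 (n : Int) 1).map (fun i => PySem.List.pyGetD ans i 0)

-- ===== PRECONDITION & SPEC =====
-- helpers for Pre_ (independent of the ports): the adjacency list of people directly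
-- richer than v, and a bounded path predicate.
def rowOK (n : Nat) (row : List Int) : Bool :=
  match row with
  | [u, v] => decide (0 ≤ u ∧ u < (n : Int) ∧ 0 ≤ v ∧ v < (n : Int))
  | _ => false

def adjP (richer : List (List Int)) (v : Int) : List Int :=
  richer.foldl (fun acc row =>
    match row with
    | [u, w] => if w = v then acc ++ [u] else acc
    | _ => acc) []

-- hasPathB richer k v = true iff some directed walk of length exactly k leaves v
def hasPathB (richer : List (List Int)) : Nat → Int → Bool
  | 0, _ => true
  | k+1, v => (adjP richer v).any (fun u => hasPathB richer k u)

-- Pre_ excludes (a) rows that are not two-element lists and indices outside [0, len(quiet)),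
-- on which A raises ValueError/IndexError — except that for indices in [-N, 0) A returns,
-- with the person labelled by whichever alias (negative or nonnegative) its DFS reaches
-- first, an order-dependent wraparound corner no caller would specify — and (b) cyclic
-- richer relations (walks of length N exist), where the problem's premise fails and A's
-- values reflect the in-progress state of its memo array, equally accidental.
def Pre_loudAndRich (richer : List (List Int)) (quiet : List Int) : Prop :=
  (∀ row ∈ richer, rowOK quiet.length row = true) ∧
  (∀ i : Nat, i < quiet.length → hasPathB richer quiet.length (Int.ofNat i) = false)

instance (richer : List (List Int)) (quiet : List Int) : Decidable (Pre_loudAndRich richer quiet) := by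
  unfold Pre_loudAndRich; infer_instance

def pvWitness_loudAndRich : List (List Int) × List Int := ([[1, 0]], [0, 1])

def Spec_loudAndRich (richer : List (List Int)) (quiet : List Int) (out : List Int) : Prop := out = loudAndRich_alt richer quiet
instance (richer : List (List Int)) (quiet : List Int) (out : List Int) : Decidable (Spec_loudAndRich richer quiet out) := by unfold Spec_loudAndRich; infer_instance

-- ===== CLAIM (what is proved, stated in full; the proofs are below) =====
def Claim_equal_loudAndRich : Prop := ∀ (richer : List (List Int)) (quiet : List Int), Dom_loudAndRich richer quiet → Pre_loudAndRich richer quiet → Spec_loudAndRich richer quiet (loudAndRich richer quiet)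

-- ===== LEMMAS AND PROOFS =====

-- The common value both programs compute: Fj k v is the answer for v after k rounds of
-- relaxation (equivalently, the quietest person reachable from v along ≤ k-1 richer-steps,
-- with A's first-strictly-quieter tie-break).
def Fj (richer : List (List Int)) (quiet : List Int) : Nat → Int → Int
  | 0, v => v
  | k+1, v => (adjP richer v).foldl
      (fun best u =>
        if PySem.List.pyGetD quiet (Fj richer quiet k u) 0 < PySem.List.pyGetD quiet best 0
        then Fj richer quiet k u else best) v

-- bounded pointed paths, for the acyclicity argument
def pathTo (richer : List (List Int)) : Nat → Int → Int → Prop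
  | 0, v, w => v = w
  | k+1, v, w => ∃ u ∈ adjP richer v, pathTo richer k u w

-- entry discipline of A's memo array: each cell is unset or already final
def entryOK (richer : List (List Int)) (quiet : List Int) (ans : List (Option Int)) (v : Int) : Prop :=
  PySem.List.pyGetD ans v none = none ∨
  PySem.List.pyGetD ans v none = some (Fj richer quiet quiet.length v)

def GoodAll (richer : List (List Int)) (quiet : List Int) (ans : List (Option Int)) : Prop :=
  ∀ j : Int, 0 ≤ j → entryOK richer quiet ans j

-- entry discipline to recursion depth k below a node
def OKd (richer : List (List Int)) (quiet : List Int) (ans : List (Option Int)) : Nat → Int → Prop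
  | 0, v => entryOK richer quiet ans v
  | k+1, v => entryOK richer quiet ans v ∧ ∀ u ∈ adjP richer v, OKd richer quiet ans k u

-- a dfs call only turns unset cells into their final values
def UpdAll (richer : List (List Int)) (quiet : List Int) (a a' : List (Option Int)) : Prop :=
  ∀ j : Int, 0 ≤ j →
    PySem.List.pyGetD a' j none = PySem.List.pyGetD a j none ∨
    (PySem.List.pyGetD a j none = none ∧
     PySem.List.pyGetD a' j none = some (Fj richer quiet quiet.length j))

-- same, except at the node currently being folded (whose cell holds the running best)
def UpdOff (richer : List (List Int)) (quiet : List Int) (node : Int) (a a' : List (Option Int)) : Prop :=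
  ∀ j : Int, 0 ≤ j → j ≠ node →
    (PySem.List.pyGetD a' j none = PySem.List.pyGetD a j none ∨
     (PySem.List.pyGetD a j none = none ∧
      PySem.List.pyGetD a' j none = some (Fj richer quiet quiet.length j)))

-- ---- basic graph lemmas ----

-- cast bridge for Int-indexed set/get (thin wrapper over PySem.List.pyGetD_pySetD_natCast)
lemma pyGetD_pySetD_int {α : Type} (xs : List α) {i j : Int} (v d : α)
    (hi0 : 0 ≤ i) (hi : i < (xs.length : Int)) (hj : 0 ≤ j) :
    PySem.List.pyGetD (PySem.List.pySetD xs i v) j d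
      = if j = i then v else PySem.List.pyGetD xs j d := by
  have h1 : i = ((i.toNat : Nat) : Int) := by omega
  have h2 : j = ((j.toNat : Nat) : Int) := by omega
  rw [h1, h2, PySem.List.pyGetD_pySetD_natCast xs i.toNat j.toNat v d (by omega)]
  simp
  split_ifs with hA hB hB <;> first | rfl | omega

lemma adjP_acc (rs : List (List Int)) (v : Int) : ∀ acc : List Int,
    rs.foldl (fun acc row =>
      match row with
      | [u, w] => if w = v then acc ++ [u] else acc
      | _ => acc) acc = acc ++ adjP rs v := by
  induction rs with
  | nil => intro acc; simp [adjP]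
  | cons row rs ih =>
    intro acc
    simp only [adjP, List.foldl_cons] at *
    rw [ih]
    conv_rhs => rw [ih]
    match row with
    | [] => rfl
    | [u] => rfl
    | [u, w] =>
      by_cases h : w = v
      · simp [h, List.append_assoc]
      · simp [h]
    | u :: w :: x :: t => rfl

lemma adjP_mem {richer : List (List Int)} {n : Nat}
    (RV : ∀ row ∈ richer, rowOK n row = true) {u v : Int} (h : u ∈ adjP richer v) :
    0 ≤ u ∧ u < (n : Int) := by
  induction richer with
  | nil => simp [adjP] at h
  | cons row rs ih =>
    have hrow := RV row (by simp)
    have hrest : ∀ r ∈ rs, rowOK n r = true := fun r hr => RV r (by simp [hr])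
    match row with
    | [a, b] =>
      simp only [adjP, List.foldl_cons] at h
      rw [adjP_acc] at h
      rcases (List.mem_append.mp h) with h1 | h1
      · by_cases hb : b = v
        · simp [hb] at h1
          simp only [rowOK, decide_eq_true_eq] at hrow
          subst h1; exact ⟨hrow.1, hrow.2.1⟩
        · simp [hb] at h1
      · exact ih hrest h1
    | [] => simp [rowOK] at hrow
    | [a] => simp [rowOK] at hrow
    | a :: b :: c :: t => simp [rowOK] at hrow

lemma build_get {richer : List (List Int)} {n : Nat}
    (RV : ∀ row ∈ richer, rowOK n row = true) {v : Int} (h0 : 0 ≤ v) (h1 : v < (n : Int)) :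
    PySem.List.pyGetD (pvBuildGraph richer n) v [] = adjP richer v := by
  unfold pvBuildGraph
  have main : ∀ (rs : List (List Int)) (g : List (List Int)), g.length = n →
      (∀ row ∈ rs, rowOK n row = true) →
      ∀ v : Int, 0 ≤ v → v < (n : Int) →
      PySem.List.pyGetD (rs.foldl (fun g row =>
        match row with
        | [u, v] => PySem.List.pySetD g v ((PySem.List.pyGetD g v []) ++ [u])
        | _ => g) g) v [] = PySem.List.pyGetD g v [] ++ adjP rs v := by
    intro rs
    induction rs with
    | nil => intro g _ _ v _ _; simp [adjP]
    | cons row rs ih =>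
      intro g hlen hrv v hv0 hv1
      have hrow := hrv row (by simp)
      have hrest : ∀ r ∈ rs, rowOK n r = true := fun r hr => hrv r (by simp [hr])
      match row with
      | [a, b] =>
        simp only [rowOK, decide_eq_true_eq] at hrow
        obtain ⟨ha0, ha1, hb0, hb1⟩ := hrow
        simp only [List.foldl_cons]
        have hg' : (PySem.List.pySetD g b ((PySem.List.pyGetD g b []) ++ [a])).length = n := by
          simp [PySem.List.length_pySetD, hlen]
        rw [ih _ hg' hrest v hv0 hv1]
        rw [pyGetD_pySetD_int g _ _ hb0 (by omega) hv0]
        have hstep : adjP ([a, b] :: rs) v = (if b = v then [a] else []) ++ adjP rs v := by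
          simp only [adjP, List.foldl_cons]
          rw [adjP_acc]
          by_cases h : b = v <;> simp [h, adjP]
        rw [hstep]
        by_cases h : v = b
        · simp [h, List.append_assoc]
        · simp [h]; omega
      | [] => simp [rowOK] at hrow
      | [a] => simp [rowOK] at hrow
      | a :: b :: c :: t => simp [rowOK] at hrow
  rw [main richer _ (by simp) RV v h0 h1]
  have : PySem.List.pyGetD (List.replicate n ([] : List Int)) v [] = [] := by
    rw [PySem.List.pyGetD_eq_getElem _ _ h0 (by simpa using h1)]
    simp
  simp [this]

-- ---- path lemmas ----

lemma hasPath_down {richer : List (List Int)} :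
    ∀ {k : Nat} {v : Int}, hasPathB richer (k+1) v = true → hasPathB richer k v = true := by
  intro k
  induction k with
  | zero => intro v _; rfl
  | succ k ih =>
    intro v h
    rw [show hasPathB richer (k+1+1) v = (adjP richer v).any (fun u => hasPathB richer (k+1) u) from rfl,
        List.any_eq_true] at h
    rw [show hasPathB richer (k+1) v = (adjP richer v).any (fun u => hasPathB richer k u) from rfl,
        List.any_eq_true]
    obtain ⟨u, hu, hp⟩ := h
    exact ⟨u, hu, ih hp⟩

lemma hasPath_false_up {richer : List (List Int)} {k : Nat} {v : Int}
    (h : hasPathB richer k v = false) : ∀ m, k ≤ m → hasPathB richer m v = false := by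
  intro m hm
  induction m, hm using Nat.le_induction with
  | base => exact h
  | succ m hm ih =>
    cases hh : hasPathB richer (m+1) v
    · rfl
    · have := hasPath_down hh
      rw [ih] at this
      cases this

lemma hasPath_false_child {richer : List (List Int)} {k : Nat} {v : Int}
    (h : hasPathB richer (k+1) v = false) : ∀ u ∈ adjP richer v, hasPathB richer k u = false := by
  intro u hu
  simp only [hasPathB, List.any_eq_false] at h
  simpa using h u hu

lemma pathTo_hasPath {richer : List (List Int)} :
    ∀ {k : Nat} {v w : Int}, pathTo richer k v w → hasPathB richer k v = true := by
  intro k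
  induction k with
  | zero => intro v w _; rfl
  | succ k ih =>
    intro v w h
    simp only [pathTo] at h
    obtain ⟨u, hu, hp⟩ := h
    simp only [hasPathB, List.any_eq_true]
    exact ⟨u, hu, ih hp⟩

lemma pathTo_trans {richer : List (List Int)} :
    ∀ {a : Nat} {v w : Int}, pathTo richer a v w → ∀ {b : Nat} {x : Int}, pathTo richer b w x →
      pathTo richer (a + b) v x := by
  intro a
  induction a with
  | zero =>
    intro v w h b x hb
    simp only [pathTo] at h
    subst h
    simpa using hb
  | succ a ih =>
    intro v w h b x hb
    simp only [pathTo] at h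
    obtain ⟨u, hu, hp⟩ := h
    have e : a + 1 + b = (a + b) + 1 := by omega
    rw [e]
    exact ⟨u, hu, ih hp hb⟩

lemma pathTo_pump {richer : List (List Int)} {c : Nat} {v : Int} (h : pathTo richer c v v) :
    ∀ m : Nat, pathTo richer (m * c) v v := by
  intro m
  induction m with
  | zero => simp only [Nat.zero_mul]; rfl
  | succ m ih =>
    have e : (m + 1) * c = m * c + c := by ring
    rw [e]
    exact pathTo_trans ih h

lemma no_cycle {richer : List (List Int)} {quiet : List Int}
    (AC : ∀ i : Nat, i < quiet.length → hasPathB richer quiet.length (Int.ofNat i) = false)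
    {v : Int} (h0 : 0 ≤ v) (h1 : v < (quiet.length : Int)) {c : Nat}
    (h : pathTo richer (c+1) v v) : False := by
  have hp := pathTo_pump h quiet.length
  have htrue := pathTo_hasPath hp
  have hfalse : hasPathB richer quiet.length v = false := by
    have hv : v = ((v.toNat : Nat) : Int) := by omega
    rw [hv]; exact AC v.toNat (by omega)
  have := hasPath_false_up hfalse (quiet.length * (c+1)) (by nlinarith)
  rw [this] at htrue
  cases htrue

lemma no_return {richer : List (List Int)} {quiet : List Int}
    (AC : ∀ i : Nat, i < quiet.length → hasPathB richer quiet.length (Int.ofNat i) = false)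
    {v u : Int} (h0 : 0 ≤ v) (h1 : v < (quiet.length : Int)) (hu : u ∈ adjP richer v)
    {j : Nat} (h : pathTo richer j u v) : False := by
  exact no_cycle AC h0 h1 (⟨u, hu, h⟩ : pathTo richer (j+1) v v)

-- ---- stability of Fj ----

lemma Fj_stable {richer : List (List Int)} {quiet : List Int} :
    ∀ {k : Nat} {v : Int}, hasPathB richer k v = false →
      ∀ m : Nat, Fj richer quiet (m + k) v = Fj richer quiet k v := by
  intro k
  induction k with
  | zero => intro v h; simp [hasPathB] at h
  | succ k ih =>
    intro v h m
    have hch := hasPath_false_child h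
    have e : m + (k+1) = (m+k)+1 := by omega
    rw [e]
    simp only [Fj]
    apply PySem.List.foldl_congr_mem
    intro acc u hu
    rw [ih (hch u hu) m]

lemma Fj_stable_ptwise {richer : List (List Int)} {quiet : List Int} {n : Nat}
    (RV : ∀ row ∈ richer, rowOK n row = true) {k : Nat}
    (h : ∀ v : Int, 0 ≤ v → v < (n : Int) → Fj richer quiet (k+1) v = Fj richer quiet k v) :
    ∀ (m : Nat) (v : Int), 0 ≤ v → v < (n : Int) →
      Fj richer quiet (k + m) v = Fj richer quiet k v := by
  intro m
  induction m with
  | zero => intro v _ _; rfl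
  | succ m ih =>
    intro v hv0 hv1
    have e : k + (m+1) = (k+m)+1 := by omega
    rw [e]
    simp only [Fj]
    have hcongr : (adjP richer v).foldl
        (fun best u => if PySem.List.pyGetD quiet (Fj richer quiet (k+m) u) 0 < PySem.List.pyGetD quiet best 0
          then Fj richer quiet (k+m) u else best) v
      = (adjP richer v).foldl
        (fun best u => if PySem.List.pyGetD quiet (Fj richer quiet k u) 0 < PySem.List.pyGetD quiet best 0
          then Fj richer quiet k u else best) v := by
      apply PySem.List.foldl_congr_mem
      intro acc u hu
      have hu' := adjP_mem RV hu
      rw [ih u hu'.1 hu'.2]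
    rw [hcongr]
    have hk := h v hv0 hv1
    simp only [Fj] at hk
    exact hk

-- ---- OK lemmas ----

lemma OKd_entry {richer : List (List Int)} {quiet : List Int} {ans : List (Option Int)} :
    ∀ {k : Nat} {v : Int}, OKd richer quiet ans k v → entryOK richer quiet ans v := by
  intro k v h
  cases k with
  | zero => exact h
  | succ k => exact h.1

lemma OKd_of_GoodAll {richer : List (List Int)} {quiet : List Int} {ans : List (Option Int)}
    (RV : ∀ row ∈ richer, rowOK quiet.length row = true)
    (h : GoodAll richer quiet ans) :
    ∀ (k : Nat) (v : Int), 0 ≤ v → OKd richer quiet ans k v := by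
  intro k
  induction k with
  | zero => intro v hv; exact h v hv
  | succ k ih =>
    intro v hv
    exact ⟨h v hv, fun u hu => ih u (adjP_mem RV hu).1⟩

lemma OKd_pres {richer : List (List Int)} {quiet : List Int}
    (RV : ∀ row ∈ richer, rowOK quiet.length row = true) :
    ∀ {k : Nat} {c : Int} {a a' : List (Option Int)}, 0 ≤ c → OKd richer quiet a k c →
      (∀ (j : Int) (m : Nat), 0 ≤ j → m ≤ k → pathTo richer m c j →
        (PySem.List.pyGetD a' j none = PySem.List.pyGetD a j none ∨
         (PySem.List.pyGetD a j none = none ∧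
          PySem.List.pyGetD a' j none = some (Fj richer quiet quiet.length j)))) →
      OKd richer quiet a' k c := by
  intro k
  induction k with
  | zero =>
    intro c a a' hc0 hok hupd
    have hc := hupd c 0 hc0 (Nat.le_refl 0) rfl
    rcases hc with heq | ⟨hn, hcorr⟩
    · rcases hok with h1 | h1
      · exact Or.inl (by rw [heq, h1])
      · exact Or.inr (by rw [heq, h1])
    · exact Or.inr hcorr
  | succ k ih =>
    intro c a a' hc0 hok hupd
    refine ⟨?_, ?_⟩
    · have hc := hupd c 0 hc0 (Nat.zero_le _) rfl
      rcases hc with heq | ⟨hn, hcorr⟩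
      · rcases hok.1 with h1 | h1
        · exact Or.inl (by rw [heq, h1])
        · exact Or.inr (by rw [heq, h1])
      · exact Or.inr hcorr
    · intro u hu
      apply ih (adjP_mem RV hu).1 (hok.2 u hu)
      intro j m hj hm hp
      exact hupd j (m+1) hj (by omega) (⟨u, hu, hp⟩ : pathTo richer (m+1) c j)

lemma GoodAll_pres {richer : List (List Int)} {quiet : List Int} {a a' : List (Option Int)}
    (h : GoodAll richer quiet a) (hu : UpdAll richer quiet a a') :
    GoodAll richer quiet a' := by
  intro j hj
  rcases hu j hj with heq | ⟨hn, hcorr⟩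
  · rcases h j hj with h1 | h1
    · exact Or.inl (by rw [heq, h1])
    · exact Or.inr (by rw [heq, h1])
  · exact Or.inr hcorr

lemma dfsA_succ_unfold (graph : List (List Int)) (quiet : List Int) (k : Nat)
    (node : Int) (ans : List (Option Int)) :
    dfsA graph quiet (k+1) node ans =
      match PySem.List.pyGetD ans node none with
      | some r => (r, ans)
      | none =>
        let ans1 := PySem.List.pySetD ans node (some node)
        let ans2 := (PySem.List.pyGetD graph node []).foldl (fun a child =>
          let res := dfsA graph quiet k child a
          if PySem.List.pyGetD quiet res.1 0 <
             PySem.List.pyGetD quiet ((PySem.List.pyGetD res.2 node none).getD node) 0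
          then PySem.List.pySetD res.2 node (some res.1)
          else res.2) ans1
        ((PySem.List.pyGetD ans2 node none).getD node, ans2) := rfl

-- ---- A-side main lemma ----

lemma dfs_spec {richer : List (List Int)} {quiet : List Int}
    (RV : ∀ row ∈ richer, rowOK quiet.length row = true)
    (AC : ∀ i : Nat, i < quiet.length → hasPathB richer quiet.length (Int.ofNat i) = false) :
    ∀ (k : Nat) (node : Int) (ans : List (Option Int)),
      0 ≤ node → node < (quiet.length : Int) →
      hasPathB richer (k+1) node = false →
      OKd richer quiet ans k node →
      ans.length = quiet.length →
      (dfsA (pvBuildGraph richer quiet.length) quiet (k+1) node ans).1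
          = Fj richer quiet quiet.length node ∧
      (dfsA (pvBuildGraph richer quiet.length) quiet (k+1) node ans).2.length = quiet.length ∧
      UpdAll richer quiet ans (dfsA (pvBuildGraph richer quiet.length) quiet (k+1) node ans).2 := by
  intro k
  induction k with
  | zero =>
    intro node ans h0 h1 hpath hok hlen
    have hadj : adjP richer node = [] := by
      rw [show hasPathB richer (0+1) node
            = (adjP richer node).any (fun u => hasPathB richer 0 u) from rfl] at hpath
      cases hAdj : adjP richer node with
      | nil => rfl
      | cons x t => rw [hAdj] at hpath; simp [hasPathB] at hpath
    have hFn : Fj richer quiet quiet.length node = node := by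
      obtain ⟨m, hm⟩ : ∃ m, quiet.length = m + 1 := ⟨quiet.length - 1, by omega⟩
      rw [hm]
      simp only [Fj]
      rw [hadj]
      rfl
    rcases hread : PySem.List.pyGetD ans node none with _ | r
    · rw [dfsA_succ_unfold]
      simp only [hread]
      rw [build_get RV h0 h1, hadj]
      simp only [List.foldl_nil]
      have hget : PySem.List.pyGetD (PySem.List.pySetD ans node (some node)) node none
          = some node := by
        rw [pyGetD_pySetD_int ans _ _ h0 (by rw [hlen]; exact h1) h0, if_pos rfl]
      refine ⟨?_, ?_, ?_⟩
      · rw [hget]; simp [hFn]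
      · simp [PySem.List.length_pySetD, hlen]
      · intro j hj
        by_cases hjn : j = node
        · subst hjn; right; exact ⟨hread, by rw [hget, hFn]⟩
        · left
          rw [pyGetD_pySetD_int ans _ _ h0 (by rw [hlen]; exact h1) hj, if_neg hjn]
    · rw [dfsA_succ_unfold]
      simp only [hread]
      have he := OKd_entry hok
      rcases he with he | he
      · rw [hread] at he; cases he
      · rw [hread] at he
        refine ⟨by injection he, hlen, fun j hj => Or.inl rfl⟩
  | succ k ih =>
    intro node ans h0 h1 hpath hok hlen
    rcases hread : PySem.List.pyGetD ans node none with _ | r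
    · -- answer[node] unset: write node, fold over children, read back
      rw [dfsA_succ_unfold]
      simp only [hread]
      have hn1 : node < ((PySem.List.pySetD ans node (some node)).length : Int) := by
        rw [PySem.List.length_pySetD, hlen]; exact h1
      have hans1get : PySem.List.pyGetD (PySem.List.pySetD ans node (some node)) node none
          = some node := by
        rw [pyGetD_pySetD_int ans _ _ h0 (by rw [hlen]; exact h1) h0, if_pos rfl]
      have hans1off : ∀ j : Int, 0 ≤ j → j ≠ node →
          PySem.List.pyGetD (PySem.List.pySetD ans node (some node)) j none
            = PySem.List.pyGetD ans j none := by
        intro j hj hjn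
        rw [pyGetD_pySetD_int ans _ _ h0 (by rw [hlen]; exact h1) hj, if_neg hjn]
      have hchfalse : ∀ c ∈ adjP richer node, hasPathB richer (k+1) c = false :=
        hasPath_false_child hpath
      -- the fold over the children list
      have fold_main : ∀ cs : List Int, (∀ c ∈ cs, c ∈ adjP richer node) →
          ∀ (a : List (Option Int)) (b : Int), a.length = quiet.length →
          PySem.List.pyGetD a node none = some b →
          UpdOff richer quiet node (PySem.List.pySetD ans node (some node)) a →
          (∀ c ∈ adjP richer node, OKd richer quiet a k c) →
          (PySem.List.pyGetD (cs.foldl (fun a child =>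
              let res := dfsA (pvBuildGraph richer quiet.length) quiet (k+1) child a
              if PySem.List.pyGetD quiet res.1 0 <
                 PySem.List.pyGetD quiet ((PySem.List.pyGetD res.2 node none).getD node) 0
              then PySem.List.pySetD res.2 node (some res.1)
              else res.2) a) node none
            = some (cs.foldl (fun best u =>
                if PySem.List.pyGetD quiet (Fj richer quiet quiet.length u) 0 <
                   PySem.List.pyGetD quiet best 0
                then Fj richer quiet quiet.length u else best) b)) ∧
          ((cs.foldl (fun a child =>
              let res := dfsA (pvBuildGraph richer quiet.length) quiet (k+1) child a
              if PySem.List.pyGetD quiet res.1 0 <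
                 PySem.List.pyGetD quiet ((PySem.List.pyGetD res.2 node none).getD node) 0
              then PySem.List.pySetD res.2 node (some res.1)
              else res.2) a).length = quiet.length) ∧
          UpdOff richer quiet node (PySem.List.pySetD ans node (some node))
            (cs.foldl (fun a child =>
              let res := dfsA (pvBuildGraph richer quiet.length) quiet (k+1) child a
              if PySem.List.pyGetD quiet res.1 0 <
                 PySem.List.pyGetD quiet ((PySem.List.pyGetD res.2 node none).getD node) 0
              then PySem.List.pySetD res.2 node (some res.1)
              else res.2) a) := by
        intro cs
        induction cs with
        | nil =>
          intro hmem a b hlenA hb hUpd hOK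
          exact ⟨hb, hlenA, hUpd⟩
        | cons c cs' ihcs =>
          intro hmem a b hlenA hb hUpd hOK
          have hcmem : c ∈ adjP richer node := hmem c (by simp)
          have hc := adjP_mem RV hcmem
          obtain ⟨hres1, hres2, hres3⟩ :=
            ih c a hc.1 hc.2 (hchfalse c hcmem) (hOK c hcmem) hlenA
          have hnodeEntry : PySem.List.pyGetD
              (dfsA (pvBuildGraph richer quiet.length) quiet (k+1) c a).2 node none
              = some b := by
            rcases hres3 node h0 with heq | ⟨hn, _⟩
            · rw [heq, hb]
            · rw [hb] at hn; cases hn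
          simp only [List.foldl_cons]
          set res := dfsA (pvBuildGraph richer quiet.length) quiet (k+1) c a with hres
          -- the new accumulator after this child
          have hstep : (let res := dfsA (pvBuildGraph richer quiet.length) quiet (k+1) c a
              if PySem.List.pyGetD quiet res.1 0 <
                 PySem.List.pyGetD quiet ((PySem.List.pyGetD res.2 node none).getD node) 0
              then PySem.List.pySetD res.2 node (some res.1)
              else res.2)
            = (if PySem.List.pyGetD quiet (Fj richer quiet quiet.length c) 0 <
                  PySem.List.pyGetD quiet b 0
               then PySem.List.pySetD res.2 node (some (Fj richer quiet quiet.length c))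
               else res.2) := by
            simp only [← hres, hres1, hnodeEntry, Option.getD_some]
          rw [hstep]
          -- facts about the new accumulator, uniform in the branch taken
          have hn2 : node < ((res.2).length : Int) := by rw [hres2]; exact h1
          have hoff : ∀ j : Int, 0 ≤ j → j ≠ node →
              PySem.List.pyGetD
                (if PySem.List.pyGetD quiet (Fj richer quiet quiet.length c) 0 <
                    PySem.List.pyGetD quiet b 0
                 then PySem.List.pySetD res.2 node (some (Fj richer quiet quiet.length c))
                 else res.2) j none = PySem.List.pyGetD res.2 j none := by
            intro j hj hjn
            split_ifs
            · rw [pyGetD_pySetD_int res.2 _ _ h0 hn2 hj, if_neg hjn]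
            · rfl
          have hentry : PySem.List.pyGetD
              (if PySem.List.pyGetD quiet (Fj richer quiet quiet.length c) 0 <
                  PySem.List.pyGetD quiet b 0
               then PySem.List.pySetD res.2 node (some (Fj richer quiet quiet.length c))
               else res.2) node none
              = some (if PySem.List.pyGetD quiet (Fj richer quiet quiet.length c) 0 <
                         PySem.List.pyGetD quiet b 0
                      then Fj richer quiet quiet.length c else b) := by
            split_ifs
            · rw [pyGetD_pySetD_int res.2 _ _ h0 hn2 h0, if_pos rfl]
            · exact hnodeEntry
          have hlen' : (if PySem.List.pyGetD quiet (Fj richer quiet quiet.length c) 0 <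
                  PySem.List.pyGetD quiet b 0
               then PySem.List.pySetD res.2 node (some (Fj richer quiet quiet.length c))
               else res.2).length = quiet.length := by
            split_ifs
            · rw [PySem.List.length_pySetD, hres2]
            · exact hres2
          have hUpd' : UpdOff richer quiet node (PySem.List.pySetD ans node (some node))
              (if PySem.List.pyGetD quiet (Fj richer quiet quiet.length c) 0 <
                  PySem.List.pyGetD quiet b 0
               then PySem.List.pySetD res.2 node (some (Fj richer quiet quiet.length c))
               else res.2) := by
            intro j hj hjn
            rw [hoff j hj hjn]
            rcases hres3 j hj with heq | ⟨hnone, hcorr⟩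
            · rcases hUpd j hj hjn with heq2 | ⟨hnone2, hcorr2⟩
              · exact Or.inl (by rw [heq, heq2])
              · exact Or.inr ⟨hnone2, by rw [heq, hcorr2]⟩
            · rcases hUpd j hj hjn with heq2 | ⟨hnone2, hcorr2⟩
              · exact Or.inr ⟨by rw [← heq2, hnone], hcorr⟩
              · rw [hcorr2] at hnone; cases hnone
          have hOK' : ∀ c' ∈ adjP richer node,
              OKd richer quiet
                (if PySem.List.pyGetD quiet (Fj richer quiet quiet.length c) 0 <
                    PySem.List.pyGetD quiet b 0
                 then PySem.List.pySetD res.2 node (some (Fj richer quiet quiet.length c))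
                 else res.2) k c' := by
            intro c' hc'
            apply OKd_pres RV (adjP_mem RV hc').1 (hOK c' hc')
            intro j m hj hm hp
            have hjn : j ≠ node := by
              intro hcontra
              subst hcontra
              exact no_return AC h0 h1 hc' hp
            rw [hoff j hj hjn]
            exact hres3 j hj
          exact ihcs (fun x hx => hmem x (by simp [hx])) _ _ hlen' hentry hUpd' hOK'
      -- apply the fold lemma to the actual children list
      have hinit_OK : ∀ c ∈ adjP richer node,
          OKd richer quiet (PySem.List.pySetD ans node (some node)) k c := by
        intro c hc
        apply OKd_pres RV (adjP_mem RV hc).1 (hok.2 c hc)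
        intro j m hj hm hp
        have hjn : j ≠ node := by
          intro hcontra; subst hcontra
          exact no_return AC h0 h1 hc hp
        exact Or.inl (hans1off j hj hjn)
      obtain ⟨hf1, hf2, hf3⟩ := fold_main (adjP richer node) (fun c hc => hc)
        (PySem.List.pySetD ans node (some node)) node
        (by rw [PySem.List.length_pySetD, hlen]) hans1get
        (fun j hj hjn => Or.inl rfl) hinit_OK
      have hacyc : hasPathB richer quiet.length node = false := by
        have hv : node = ((node.toNat : Nat) : Int) := by omega
        rw [hv]; exact AC node.toNat (by omega)
      have hfoldF : (adjP richer node).foldl (fun best u =>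
          if PySem.List.pyGetD quiet (Fj richer quiet quiet.length u) 0 <
             PySem.List.pyGetD quiet best 0
          then Fj richer quiet quiet.length u else best) node
          = Fj richer quiet quiet.length node := by
        have hdef : Fj richer quiet (quiet.length+1) node = (adjP richer node).foldl
            (fun best u =>
              if PySem.List.pyGetD quiet (Fj richer quiet quiet.length u) 0 <
                 PySem.List.pyGetD quiet best 0
              then Fj richer quiet quiet.length u else best) node := by
          simp only [Fj]
        rw [← hdef, show quiet.length + 1 = 1 + quiet.length by omega]
        exact Fj_stable hacyc 1
      rw [build_get RV h0 h1]
      refine ⟨?_, ?_, ?_⟩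
      · rw [hf1, hfoldF]; rfl
      · exact hf2
      · intro j hj
        by_cases hjn : j = node
        · subst hjn
          right
          refine ⟨hread, ?_⟩
          rw [hf1, hfoldF]
        · rcases hf3 j hj hjn with heq | ⟨hnone, hcorr⟩
          · left; rw [heq, hans1off j hj hjn]
          · right
            rw [hans1off j hj hjn] at hnone
            exact ⟨hnone, hcorr⟩
    · rw [dfsA_succ_unfold]
      simp only [hread]
      have he := OKd_entry hok
      rcases he with he | he
      · rw [hread] at he; cases he
      · rw [hread] at he
        refine ⟨by injection he, hlen, fun j hj => Or.inl rfl⟩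

lemma top_spec {richer : List (List Int)} {quiet : List Int}
    (RV : ∀ row ∈ richer, rowOK quiet.length row = true)
    (AC : ∀ i : Nat, i < quiet.length → hasPathB richer quiet.length (Int.ofNat i) = false) :
    ∀ (l : List Int) (acc : List Int) (ans : List (Option Int)),
      (∀ i ∈ l, 0 ≤ i ∧ i < (quiet.length : Int)) →
      GoodAll richer quiet ans → ans.length = quiet.length →
      (l.foldl (fun (acc : List Int × List (Option Int)) i =>
          let res := dfsA (pvBuildGraph richer quiet.length) quiet (quiet.length+1) i acc.2
          (acc.1 ++ [res.1], res.2)) (acc, ans)).1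
        = acc ++ l.map (Fj richer quiet quiet.length) := by
  intro l
  induction l with
  | nil => intro acc ans _ _ _; simp
  | cons i l ihl =>
    intro acc ans hmem hgood hlen
    have hi := hmem i (by simp)
    have hpath : hasPathB richer (quiet.length+1) i = false := by
      have hfalse : hasPathB richer quiet.length i = false := by
        have hv : i = ((i.toNat : Nat) : Int) := by omega
        rw [hv]; exact AC i.toNat (by omega)
      exact hasPath_false_up hfalse _ (by omega)
    have hok := OKd_of_GoodAll RV hgood quiet.length i hi.1
    obtain ⟨h1, h2, h3⟩ := dfs_spec RV AC quiet.length i ans hi.1 hi.2 hpath hok hlen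
    simp only [List.foldl_cons, List.map_cons]
    rw [ihl _ _ (fun j hj => hmem j (by simp [hj])) (GoodAll_pres hgood h3) h2]
    rw [h1]
    simp

-- ---- B-side lemmas ----

lemma relax_spec {richer : List (List Int)} {quiet : List Int}
    (RV : ∀ row ∈ richer, rowOK quiet.length row = true)
    {prev : List Int} {k : Nat}
    (hp : ∀ v : Int, 0 ≤ v → v < (quiet.length : Int) →
      PySem.List.pyGetD prev v 0 = Fj richer quiet k v) :
    ∀ v : Int, 0 ≤ v → v < (quiet.length : Int) →
      PySem.List.pyGetD (bRelax (pvBuildGraph richer quiet.length) quiet quiet.length prev) v 0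
        = Fj richer quiet (k+1) v := by
  intro v hv0 hv1
  unfold bRelax
  rw [PySem.List.foldl_append_singleton_eq_map]
  rw [List.nil_append]
  rw [PySem.List.pyGetD_map_pyRange_of_nonneg _ _ _ _ hv0 hv1]
  rw [build_get RV hv0 hv1]
  simp only [Fj, bBest]
  apply PySem.List.foldl_congr_mem
  intro acc u hu
  have hu' := adjP_mem RV hu
  rw [hp u hu'.1 hu'.2]

lemma relax_len {richer : List (List Int)} {quiet : List Int} {prev : List Int} :
    (bRelax (pvBuildGraph richer quiet.length) quiet quiet.length prev).length
      = quiet.length := by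
  unfold bRelax
  rw [PySem.List.foldl_append_singleton_eq_map]
  simp [PySem.List.length_pyRange_one]

lemma iter_spec {richer : List (List Int)} {quiet : List Int}
    (RV : ∀ row ∈ richer, rowOK quiet.length row = true)
    (AC : ∀ i : Nat, i < quiet.length → hasPathB richer quiet.length (Int.ofNat i) = false) :
    ∀ (fuel k : Nat) (ans : List Int),
      ans.length = quiet.length →
      (∀ v : Int, 0 ≤ v → v < (quiet.length : Int) →
        PySem.List.pyGetD ans v 0 = Fj richer quiet k v) →
      quiet.length ≤ fuel + k →
      ∀ v : Int, 0 ≤ v → v < (quiet.length : Int) →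
        PySem.List.pyGetD (bIter (pvBuildGraph richer quiet.length) quiet quiet.length fuel ans) v 0
          = Fj richer quiet quiet.length v := by
  have Fj_ge : ∀ (k : Nat), quiet.length ≤ k → ∀ v : Int, 0 ≤ v → v < (quiet.length : Int) →
      Fj richer quiet k v = Fj richer quiet quiet.length v := by
    intro k hk v hv0 hv1
    have hfalse : hasPathB richer quiet.length v = false := by
      have hv : v = ((v.toNat : Nat) : Int) := by omega
      rw [hv]; exact AC v.toNat (by omega)
    have hst := Fj_stable (quiet := quiet) hfalse (k - quiet.length)
    rw [show k = (k - quiet.length) + quiet.length by omega]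
    exact hst
  intro fuel
  induction fuel with
  | zero =>
    intro k ans hlen hv hn v hv0 hv1
    simp only [bIter]
    rw [hv v hv0 hv1]
    exact Fj_ge k (by omega) v hv0 hv1
  | succ fuel ih =>
    intro k ans hlen hv hn v hv0 hv1
    simp only [bIter]
    by_cases hb : (bRelax (pvBuildGraph richer quiet.length) quiet quiet.length ans == ans) = true
    · simp only [hb, if_true]
      have heq : bRelax (pvBuildGraph richer quiet.length) quiet quiet.length ans = ans := by
        simpa using hb
      have hfix : ∀ w : Int, 0 ≤ w → w < (quiet.length : Int) →
          Fj richer quiet (k+1) w = Fj richer quiet k w := by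
        intro w h0 h1
        rw [← relax_spec RV hv w h0 h1, heq, hv w h0 h1]
      rw [hv v hv0 hv1]
      by_cases hkn : quiet.length ≤ k
      · exact Fj_ge k hkn v hv0 hv1
      · have := Fj_stable_ptwise RV hfix (quiet.length - k) v hv0 hv1
        rw [show k + (quiet.length - k) = quiet.length by omega] at this
        exact this.symm
    · rw [if_neg (by exact fun hh => hb hh)]
      exact ih (k+1) _ relax_len (relax_spec RV hv) (by omega) v hv0 hv1

-- ===== VERDICT (by name: the statement is the Claim_ definition above) =====
theorem loudAndRich_spec : Claim_equal_loudAndRich := by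
  unfold Claim_equal_loudAndRich
  intro richer quiet _ hpre
  obtain ⟨RV, AC⟩ := hpre
  unfold Spec_loudAndRich
  have hrep : ∀ j : Int,
      PySem.List.pyGetD (List.replicate quiet.length (none : Option Int)) j none = none := by
    intro j
    by_cases hr : PySem.Raise.InRange (List.replicate quiet.length (none : Option Int)).length j
    · exact List.eq_of_mem_replicate (PySem.List.pyGetD_mem _ none hr)
    · exact PySem.List.pyGetD_of_none _ _ _ ((PySem.List.pyGet?_eq_none_iff _ _).mpr hr)
  have hA : loudAndRich richer quiet
      = (PySem.List.pyRange 0 (quiet.length : Int) 1).map (Fj richer quiet quiet.length) := by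
    unfold loudAndRich
    rw [top_spec RV AC _ [] _ ?_ ?_ ?_]
    · simp
    · intro i hi
      have := PySem.List.mem_pyRange_one.mp hi
      exact ⟨this.1, this.2⟩
    · intro j _
      exact Or.inl (hrep j)
    · simp
  have hB : loudAndRich_alt richer quiet
      = (PySem.List.pyRange 0 (quiet.length : Int) 1).map (Fj richer quiet quiet.length) := by
    unfold loudAndRich_alt
    apply List.map_congr_left
    intro i hi
    have hi' := PySem.List.mem_pyRange_one.mp hi
    apply iter_spec RV AC quiet.length 0 _ ?_ ?_ (by omega) i hi'.1 hi'.2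
    · simp [PySem.List.length_pyRange_one]
    · intro v hv0 hv1
      rw [PySem.List.pyGetD_eq_getElem _ _ hv0
          (by rw [PySem.List.length_pyRange_one]; omega)]
      rw [PySem.List.getElem_pyRange_one 0 _ v.toNat
          (by rw [PySem.List.length_pyRange_one]; omega)]
      simp only [Fj]
      omega
  rw [hA, hB]
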